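-- pv_equiv track=rewrite | github.com/Zeeeepa/codege | backend/api_routes.py | extract_plan_from_logs
-- ===== SOURCE A (Python) =====
-- from typing import List, Optional
--
-- def extract_plan_from_logs(logs: List[str]) -> str:
--     """Extract implementation plan from agent run logs"""
--     plan_content = []
--     in_plan_section = False
--
--     for log_entry in logs:
--         if "implementation plan" in log_entry.lower():
--             in_plan_section = True
--         elif in_plan_section and log_entry.strip():
--             plan_content.append(log_entry)
--         elif in_plan_section and not log_entry.strip():
--             break
--
--     if plan_content:
--         return "\n".join(plan_content)
--     else:
--         # Default plan template
--         return """# Implementation Plan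
--
-- ## Phase 1: Analysis and Setup
-- - Analyze current codebase structure
-- - Identify required dependencies
-- - Set up development environment
--
-- ## Phase 2: Core Implementation
-- - Implement main functionality
-- - Add error handling
-- - Write unit tests
--
-- ## Phase 3: Integration and Testing
-- - Integrate with existing systems
-- - Perform integration testing
-- - Optimize performance
--
-- ## Phase 4: Documentation and Deployment
-- - Update documentation
-- - Prepare deployment scripts
-- - Deploy to staging environment"""
-- ===== SOURCE B (Python) =====
-- from typing import List, Optional
--
-- _DEFAULT_PLAN = """# Implementation Plan
--
-- ## Phase 1: Analysis and Setup
-- - Analyze current codebase structure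
-- - Identify required dependencies
-- - Set up development environment
--
-- ## Phase 2: Core Implementation
-- - Implement main functionality
-- - Add error handling
-- - Write unit tests
--
-- ## Phase 3: Integration and Testing
-- - Integrate with existing systems
-- - Perform integration testing
-- - Optimize performance
--
-- ## Phase 4: Documentation and Deployment
-- - Update documentation
-- - Prepare deployment scripts
-- - Deploy to staging environment"""
--
--
-- def extract_plan_from_logs(logs: List[str]) -> str:
--     """Extract implementation plan from agent run logs"""
--     start = next((i for i, entry in enumerate(logs)
--                   if "implementation plan" in entry.lower()), None)
--     if start is None:
--         return _DEFAULT_PLAN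
--     tail = logs[start + 1:]
--     stop = next((i for i, entry in enumerate(tail) if not entry.strip()), len(tail))
--     content = [entry for entry in tail[:stop]
--                if "implementation plan" not in entry.lower()]
--     return "\n".join(content) if content else _DEFAULT_PLAN
-- ===== Notes on version B (the rewrite author's own statement) =====
-- stated objective: alternative
-- what changed: Replaces A's stateful flag-and-break loop with a find-first-marker index, a slice of the tail up to the first blank line, and a filter dropping marker lines, joined at the end.
import Mathlib
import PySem

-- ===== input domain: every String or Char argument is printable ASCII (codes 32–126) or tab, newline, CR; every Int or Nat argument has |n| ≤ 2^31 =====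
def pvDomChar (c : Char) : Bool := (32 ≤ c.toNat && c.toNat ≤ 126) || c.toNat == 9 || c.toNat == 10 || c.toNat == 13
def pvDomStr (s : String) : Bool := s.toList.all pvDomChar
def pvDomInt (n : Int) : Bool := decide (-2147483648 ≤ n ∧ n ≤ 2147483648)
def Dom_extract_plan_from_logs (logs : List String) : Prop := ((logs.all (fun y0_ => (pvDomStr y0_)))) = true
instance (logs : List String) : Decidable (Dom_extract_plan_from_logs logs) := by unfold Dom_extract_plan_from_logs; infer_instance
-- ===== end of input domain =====

-- B replaces A's stateful flag-and-break loop with a find-marker-index / slice-to-first-blank / filter pipeline (objective: alternative decomposition, same cost).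

-- the default plan template (the same triple-quoted literal appears in both Pythons)
def planDefault : String := "# Implementation Plan\n\n## Phase 1: Analysis and Setup\n- Analyze current codebase structure\n- Identify required dependencies\n- Set up development environment\n\n## Phase 2: Core Implementation\n- Implement main functionality\n- Add error handling\n- Write unit tests\n\n## Phase 3: Integration and Testing\n- Integrate with existing systems\n- Perform integration testing\n- Optimize performance\n\n## Phase 4: Documentation and Deployment\n- Update documentation\n- Prepare deployment scripts\n- Deploy to staging environment"

-- '"implementation plan" in entry.lower()' (identical subexpression in both Pythons)
def pvMark (l : String) : Bool := PySem.Str.isIn "implementation plan" (PySem.Str.lower l)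
-- 'not entry.strip()' (blank-line test, identical subexpression in both Pythons)
def pvBlank (l : String) : Bool := PySem.Str.strip l == ""

-- ===== PORT A =====
-- A's for-loop over logs with the in_plan_section flag, the appended list and the break
def aLoop : List String → Bool → List String → List String
  | [], _, acc => acc
  | l :: rest, inSec, acc =>
    if pvMark l then aLoop rest true acc
    else if inSec && !pvBlank l then aLoop rest inSec (acc ++ [l])
    else if inSec && pvBlank l then acc          -- break
    else aLoop rest inSec acc

def extract_plan_from_logs (logs : List String) : String :=
  let planContent := aLoop logs false []
  if planContent.isEmpty then planDefault
  else PySem.Str.join "\n" planContent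

-- ===== PORT B =====
def extract_plan_from_logs_alt (logs : List String) : String :=
  match logs.findIdx? pvMark with
  | none => planDefault
  | some start =>
    let tail := logs.drop (start + 1)
    let stop := (tail.findIdx? pvBlank).getD tail.length
    let content := (tail.take stop).filter (fun l => !pvMark l)
    if content.isEmpty then planDefault
    else PySem.Str.join "\n" content

-- ===== PRECONDITION & SPEC =====
def Spec_extract_plan_from_logs (logs : List String) (out : String) : Prop := out = extract_plan_from_logs_alt logs
instance (logs : List String) (out : String) : Decidable (Spec_extract_plan_from_logs logs out) := by unfold Spec_extract_plan_from_logs; infer_instance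

-- ===== CLAIM (what is proved, stated in full; the proofs are below) =====
def Claim_equal_extract_plan_from_logs : Prop := ∀ (logs : List String), Dom_extract_plan_from_logs logs → Spec_extract_plan_from_logs logs (extract_plan_from_logs logs)

-- ===== LEMMAS AND PROOFS =====

-- a blank line (one whose strip() is empty) can never contain the marker substring
theorem blank_not_mark (l : String) (hb : pvBlank l = true) : pvMark l = false := by
  by_contra h
  have hm : pvMark l = true := by revert h; cases pvMark l <;> simp
  have hinf : ("implementation plan").toList <:+: (PySem.Str.lower l).toList :=
    (PySem.Str.isIn_iff_infix _ _).mp hm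
  have hi : 'i' ∈ (PySem.Str.lower l).toList := hinf.sublist.subset (by decide)
  rw [PySem.Str.toList_lower] at hi
  simp only [PySem.Chars.lower, List.mem_map] at hi
  obtain ⟨c, hc, hci⟩ := hi
  -- every character of l is whitespace, since strip l = ""
  have hstrip : PySem.Chars.strip l.toList = [] := by
    have h0 : PySem.Str.strip l = "" := by simpa [pvBlank] using hb
    have h1 := congrArg String.toList h0
    rwa [PySem.Str.toList_strip] at h1
  have hall : ∀ x ∈ l.toList, PySem.Chars.isspace x = true := by
    unfold PySem.Chars.strip PySem.Chars.rstrip PySem.Chars.lstrip at hstrip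
    rcases hdw : List.dropWhile PySem.Chars.isspace l.toList with _ | ⟨c', cs⟩
    · intro x hx
      have hsplit : l.toList =
          List.takeWhile PySem.Chars.isspace l.toList ++ List.dropWhile PySem.Chars.isspace l.toList :=
        (List.takeWhile_append_dropWhile).symm
      rw [hsplit, hdw, List.append_nil] at hx
      exact List.mem_takeWhile_imp hx
    · exfalso
      rw [hdw] at hstrip
      have hrev : ∀ x ∈ (c' :: cs).reverse, PySem.Chars.isspace x = true :=
        List.dropWhile_eq_nil_iff.mp (List.reverse_eq_nil_iff.mp hstrip)
      have hc' : PySem.Chars.isspace c' = true := hrev c' (by simp)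
      have hne : List.dropWhile PySem.Chars.isspace l.toList ≠ [] := by
        rw [hdw]; exact List.cons_ne_nil _ _
      have hhead := List.head_dropWhile_not PySem.Chars.isspace hne
      have heq : (List.dropWhile PySem.Chars.isspace l.toList).head hne = c' := by
        simp [hdw]
      rw [heq, hc'] at hhead
      simp at hhead
  have hsc : PySem.Chars.isspace c = true := hall c hc
  -- a whitespace character cannot lower to 'i'
  unfold PySem.Chars.lowerChar at hci
  by_cases hu : PySem.Chars.isupper c = true
  · unfold PySem.Chars.isupper at hu
    unfold PySem.Chars.isspace at hsc
    simp only [Bool.and_eq_true, decide_eq_true_eq] at hu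
    obtain ⟨hu1, hu2⟩ := hu
    rw [Char.le_def, UInt32.le_iff_toNat_le] at hu1 hu2
    have hu1' : 65 ≤ c.toNat := hu1
    have hu2' : c.toNat ≤ 90 := hu2
    simp only [Bool.or_eq_true, Bool.and_eq_true, decide_eq_true_eq] at hsc
    omega
  · rw [if_neg hu] at hci
    subst hci
    unfold PySem.Chars.isspace at hsc
    simp at hsc

theorem mark_not_blank {l : String} (hm : pvMark l = true) : pvBlank l = false := by
  cases hb : pvBlank l
  · rfl
  · rw [blank_not_mark l hb] at hm; exact absurd hm (by simp)

-- index of the first blank line (length if none): B's 'stop'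
def stopIdx (xs : List String) : Nat := (xs.findIdx? pvBlank).getD xs.length

theorem stopIdx_cons_false {l : String} {rest : List String} (hb : pvBlank l = false) :
    stopIdx (l :: rest) = stopIdx rest + 1 := by
  unfold stopIdx
  rw [List.findIdx?_cons, if_neg (by simp [hb])]
  cases h : List.findIdx? pvBlank rest <;> simp [List.length_cons]

theorem stopIdx_cons_true {l : String} {rest : List String} (hb : pvBlank l = true) :
    stopIdx (l :: rest) = 0 := by
  unfold stopIdx
  rw [List.findIdx?_cons, if_pos hb]
  rfl

-- once the flag is set, A collects exactly the non-marker lines before the first blank line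
theorem aLoop_true (xs : List String) :
    ∀ acc, aLoop xs true acc = acc ++ (xs.take (stopIdx xs)).filter (fun l => !pvMark l) := by
  induction xs with
  | nil => intro acc; simp [aLoop, stopIdx]
  | cons l rest ih =>
    intro acc
    by_cases hm : pvMark l = true
    · have hb := mark_not_blank hm
      rw [aLoop, if_pos hm, ih, stopIdx_cons_false hb, List.take_succ_cons,
        List.filter_cons_of_neg (by simp [hm])]
    · have hmf : pvMark l = false := by simpa using hm
      by_cases hb : pvBlank l = true
      · rw [aLoop, if_neg (by simp [hmf]), if_neg (by simp [hb]), if_pos (by simp [hb]),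
          stopIdx_cons_true hb]
        simp
      · have hbf : pvBlank l = false := by simpa using hb
        rw [aLoop, if_neg (by simp [hmf]), if_pos (by simp [hbf]), ih,
          stopIdx_cons_false hbf, List.take_succ_cons,
          List.filter_cons_of_pos (by simp [hmf])]
        simp

-- before any marker line, A collects nothing
theorem aLoop_none (xs : List String) (h : xs.findIdx? pvMark = none) :
    ∀ acc, aLoop xs false acc = acc := by
  induction xs with
  | nil => intro acc; rfl
  | cons l rest ih =>
    intro acc
    rw [List.findIdx?_cons] at h
    by_cases hm : pvMark l = true
    · rw [if_pos hm] at h; exact absurd h (by simp)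
    · have hmf : pvMark l = false := by simpa using hm
      rw [if_neg (by simp [hmf]), Option.map_eq_none_iff] at h
      rw [aLoop, if_neg (by simp [hmf]), if_neg (by simp), if_neg (by simp)]
      exact ih h acc

-- A's loop jumps to the flagged phase right after the first marker line
theorem aLoop_some : ∀ (xs : List String) (i : Nat) (acc : List String),
    xs.findIdx? pvMark = some i → aLoop xs false acc = aLoop (xs.drop (i + 1)) true acc := by
  intro xs
  induction xs with
  | nil => intro i acc h; simp at h
  | cons l rest ih =>
    intro i acc h
    rw [List.findIdx?_cons] at h
    by_cases hm : pvMark l = true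
    · rw [if_pos hm] at h
      obtain rfl : (0 : Nat) = i := by simpa using h
      rw [aLoop, if_pos hm]
      rfl
    · have hmf : pvMark l = false := by simpa using hm
      rw [if_neg (by simp [hmf])] at h
      obtain ⟨j, hj, rfl⟩ := Option.map_eq_some_iff.mp h
      rw [aLoop, if_neg (by simp [hmf]), if_neg (by simp), if_neg (by simp)]
      rw [ih j acc hj]
      rfl

-- ===== VERDICT (by name: the statement is the Claim_ definition above) =====
theorem extract_plan_from_logs_spec : Claim_equal_extract_plan_from_logs := by
  intro logs _
  unfold Spec_extract_plan_from_logs extract_plan_from_logs extract_plan_from_logs_alt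
  cases hf : logs.findIdx? pvMark with
  | none => rw [aLoop_none logs hf]; rfl
  | some i =>
    rw [aLoop_some logs i [] hf, aLoop_true, List.nil_append]
    rfl
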